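-- pv_equiv track=rewrite | github.com/erdincerdgn/neuraltrade | modules/causal/dag_engine.py | _creates_cycle
-- ===== SOURCE A (Python) =====
-- from typing import List, Tuple, Set, Dict, Optional
--
-- def _creates_cycle(dag: Dict[str, Set[str]], source: str, target: str) -> bool:
--     visited = set()
--     stack = [target]
--     while stack:
--         node = stack.pop()
--         if node == source:
--             return True
--         if node not in visited:
--             visited.add(node)
--             stack.extend(dag[node])
--     return False
-- ===== SOURCE B (Python) =====
-- from typing import List, Tuple, Set, Dict, Optional
--
-- def _creates_cycle(dag: Dict[str, Set[str]], source: str, target: str) -> bool: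
--     if target == source:
--         return True
--     reached = {target}
--     frontier = {target}
--     while frontier:
--         nxt = set()
--         for node in frontier:
--             for nb in dag[node]:
--                 if nb == source:
--                     return True
--                 if nb not in reached:
--                     nxt.add(nb)
--         reached |= nxt
--         frontier = nxt
--     return False
-- ===== Notes on version B (the rewrite author's own statement) =====
-- stated objective: alternative
-- what changed: Replaced the explicit-stack one-node-at-a-time DFS with breadth-first level saturation: a frontier set is expanded a whole level per round, with an early True as soon as any scanned neighbor equals source, until the frontier is empty.
import Mathlib
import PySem

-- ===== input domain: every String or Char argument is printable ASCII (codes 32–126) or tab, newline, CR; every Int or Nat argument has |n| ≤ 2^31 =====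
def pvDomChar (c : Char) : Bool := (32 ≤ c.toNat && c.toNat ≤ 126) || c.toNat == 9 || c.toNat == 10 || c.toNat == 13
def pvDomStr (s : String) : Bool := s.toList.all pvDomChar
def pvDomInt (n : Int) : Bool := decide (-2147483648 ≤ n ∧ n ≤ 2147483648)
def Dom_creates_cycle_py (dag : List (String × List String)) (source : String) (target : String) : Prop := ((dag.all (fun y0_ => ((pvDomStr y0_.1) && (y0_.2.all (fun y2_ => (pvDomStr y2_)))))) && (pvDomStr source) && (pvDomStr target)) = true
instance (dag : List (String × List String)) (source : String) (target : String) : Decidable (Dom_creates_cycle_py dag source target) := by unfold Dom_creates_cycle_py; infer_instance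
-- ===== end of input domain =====

-- B replaces A's explicit-stack one-node-at-a-time DFS by breadth-first level saturation
-- (a frontier set expanded a whole level per round, with an early True on a neighbor equal
-- to source); same cost, genuinely different traversal. Equivalence is about return values;
-- neither program mutates its arguments.

-- ===== PORT A =====
-- dag[node]: dict lookup, first-match per the association-list convention (PySem.Dict);
-- the KeyError case (node absent) is excluded by Pre_ below, so the total form getD … [] is exact there.
def pvLookup (dag : List (String × List String)) (node : String) : List String :=
  PySem.Dict.getD (PySem.Dict.mk dag) node []

-- fuel bookkeeping (totality device only): total length of adjacency lists whose key is not yet visited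
def pvRem (dag : List (String × List String)) (visited : List String) : Nat :=
  match dag with
  | [] => 0
  | p :: tl => (if p.1 ∈ visited then 0 else p.2.length) + pvRem tl visited

-- the while-loop of A: stack held top-first (Python's stack.pop() takes the last element,
-- stack.extend(nbrs) makes the last neighbor the next pop — hence nbrs.reverse ++ rest)
def pvLoopA (dag : List (String × List String)) (source : String) :
    Nat → List String → List String → Bool
  | 0, _, _ => false
  | _ + 1, _, [] => false
  | fuel + 1, visited, node :: rest =>
    if node = source then true
    else if node ∈ visited then pvLoopA dag source fuel visited rest
    else pvLoopA dag source fuel (node :: visited) ((pvLookup dag node).reverse ++ rest)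

def creates_cycle_py (dag : List (String × List String)) (source : String) (target : String) : Bool :=
  pvLoopA dag source (1 + pvRem dag []) [] [target]

-- ===== PORT B =====
-- inner loop: for nb in dag[node]: if nb == source: return True (none); if nb not in reached: nxt.add(nb)
def pvScanNbrs (source : String) (reached : PySem.Set String) :
    List String → PySem.Set String → Option (PySem.Set String)
  | [], nxt => some nxt
  | nb :: t, nxt =>
    if nb = source then none
    else if nb ∈ reached then pvScanNbrs source reached t nxt
    else pvScanNbrs source reached t (PySem.Set.add nxt nb)

-- middle loop: for node in frontier (result is order-independent: a Bool about set reachability)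
def pvScanFrontier (dag : List (String × List String)) (source : String)
    (reached : PySem.Set String) :
    List String → PySem.Set String → Option (PySem.Set String)
  | [], nxt => some nxt
  | node :: t, nxt =>
    match pvScanNbrs source reached (pvLookup dag node) nxt with
    | none => none
    | some nxt' => pvScanFrontier dag source reached t nxt'

-- outer while frontier: loop (fuel is a totality device only)
def pvLoopB (dag : List (String × List String)) (source : String) :
    Nat → PySem.Set String → PySem.Set String → Bool
  | 0, _, _ => false
  | fuel + 1, reached, frontier =>
    match frontier with
    | [] => false
    | _ :: _ =>
      match pvScanFrontier dag source reached frontier PySem.Set.empty with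
      | none => true
      | some nxt => pvLoopB dag source fuel (PySem.Set.union reached nxt) nxt

def creates_cycle_py_alt (dag : List (String × List String)) (source : String) (target : String) : Bool :=
  if target = source then true
  else pvLoopB dag source (2 + (dag.flatMap (fun p => p.2)).length)
        (PySem.Set.ofList [target]) (PySem.Set.ofList [target])

-- ===== PRECONDITION & SPEC =====
-- Pre_ excludes exactly the inputs on which the traversal can leave the dict: some node reachable
-- from target (before reaching source) is not a dag key, so dag[node] raises KeyError in A — and,
-- since dict values are Python SETS iterated in hash order, whether A raises or returns there is an
-- accident of iteration order. Stated declaratively: some subset S of the keys contains target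
-- (unless target = source) and is closed under the edge relation up to source.
def Pre_creates_cycle_py (dag : List (String × List String)) (source : String) (target : String) : Prop :=
  ∃ S ∈ (dag.map Prod.fst).sublists,
    (target = source ∨ target ∈ S) ∧ ∀ k ∈ S, ∀ v ∈ pvLookup dag k, v = source ∨ v ∈ S
instance (dag : List (String × List String)) (source : String) (target : String) : Decidable (Pre_creates_cycle_py dag source target) := by unfold Pre_creates_cycle_py; infer_instance

def pvWitness_creates_cycle_py : (List (String × List String)) × String × String :=
  ([("a", ["b"]), ("b", [])], "b", "a")

def Spec_creates_cycle_py (dag : List (String × List String)) (source : String) (target : String) (out : Bool) : Prop := out = creates_cycle_py_alt dag source target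
instance (dag : List (String × List String)) (source : String) (target : String) (out : Bool) : Decidable (Spec_creates_cycle_py dag source target out) := by unfold Spec_creates_cycle_py; infer_instance

-- ===== CLAIM (what is proved, stated in full; the proofs are below) =====
def Claim_equal_creates_cycle_py : Prop := ∀ (dag : List (String × List String)) (source : String) (target : String), Dom_creates_cycle_py dag source target → Pre_creates_cycle_py dag source target → Spec_creates_cycle_py dag source target (creates_cycle_py dag source target)

-- ===== LEMMAS AND PROOFS =====

-- "node can reach source along dag edges" — the common characterisation of both ports
inductive pvReach (dag : List (String × List String)) (source : String) : String → Prop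
  | refl : pvReach dag source source
  | step (n n' : String) (h : n' ∈ pvLookup dag n) (hr : pvReach dag source n') :
      pvReach dag source n

theorem pvLookup_nil (node : String) : pvLookup [] node = [] := rfl

theorem pvLookup_cons (k : String) (vs : List String) (tl : List (String × List String))
    (node : String) :
    pvLookup ((k, vs) :: tl) node = if k = node then vs else pvLookup tl node := by
  simp only [pvLookup, PySem.Dict.getD_eq_get?_getD, PySem.Dict.get?_mk_cons]
  by_cases h : k = node
  · simp [h]
  · simp [h]

theorem pvRem_mono (dag : List (String × List String)) (visited visited' : List String)
    (h : ∀ x ∈ visited, x ∈ visited') : pvRem dag visited' ≤ pvRem dag visited := by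
  induction dag with
  | nil => simp [pvRem]
  | cons p tl ih =>
    simp only [pvRem]
    have hle : (if p.1 ∈ visited' then 0 else p.2.length) ≤ (if p.1 ∈ visited then 0 else p.2.length) := by
      by_cases h2 : p.1 ∈ visited
      · simp [h2, h _ h2]
      · split <;> omega
    omega

theorem pvRem_cons_le (dag : List (String × List String)) (visited : List String)
    (node : String) (h : node ∉ visited) :
    (pvLookup dag node).length + pvRem dag (node :: visited) ≤ pvRem dag visited := by
  induction dag with
  | nil => simp [pvLookup_nil, pvRem]
  | cons p tl ih =>
    obtain ⟨k, vs⟩ := p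
    by_cases hk : k = node
    · subst hk
      rw [pvLookup_cons, if_pos rfl]
      simp only [pvRem]
      rw [if_pos (List.mem_cons_self ..), if_neg h]
      have := pvRem_mono tl visited (k :: visited) (fun x hx => List.mem_cons_of_mem _ hx)
      omega
    · rw [pvLookup_cons, if_neg hk]
      simp only [pvRem]
      have heq : (if k ∈ node :: visited then 0 else vs.length) = (if k ∈ visited then 0 else vs.length) := by
        simp [List.mem_cons, hk]
      rw [heq]
      have := ih
      omega

theorem pvClosed_not_reach (dag : List (String × List String)) (source : String)
    (V : List String)
    (hV : ∀ v ∈ V, v ≠ source ∧ ∀ n' ∈ pvLookup dag v, n' ∈ V) :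
    ∀ v, pvReach dag source v → v ∈ V → False := by
  intro v hr
  induction hr with
  | refl => intro h; exact (hV _ h).1 rfl
  | step n n' hmem _ ih => intro h; exact ih ((hV n h).2 n' hmem)

-- ----- port A = reachability -----

theorem pvLoopA_sound (dag : List (String × List String)) (source : String) :
    ∀ (fuel : Nat) (visited stack : List String),
      pvLoopA dag source fuel visited stack = true →
      ∃ n ∈ stack, pvReach dag source n := by
  intro fuel
  induction fuel with
  | zero => intro visited stack h; simp [pvLoopA] at h
  | succ fuel ih =>
    intro visited stack h
    match stack with
    | [] => simp [pvLoopA] at h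
    | node :: rest =>
      simp only [pvLoopA] at h
      split_ifs at h with h1 h2
      · exact ⟨node, List.mem_cons_self .., by rw [h1]; exact pvReach.refl⟩
      · obtain ⟨n, hn, hr⟩ := ih _ _ h
        exact ⟨n, List.mem_cons_of_mem _ hn, hr⟩
      · obtain ⟨n, hn, hr⟩ := ih _ _ h
        rcases List.mem_append.mp hn with hn | hn
        · exact ⟨node, List.mem_cons_self .., pvReach.step node n (List.mem_reverse.mp hn) hr⟩
        · exact ⟨n, List.mem_cons_of_mem _ hn, hr⟩

theorem pvLoopA_complete (dag : List (String × List String)) (source : String) :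
    ∀ (fuel : Nat) (visited stack : List String),
      stack.length + pvRem dag visited ≤ fuel →
      (∀ v ∈ visited, v ≠ source ∧ ∀ n' ∈ pvLookup dag v, n' ∈ visited ∨ n' ∈ stack) →
      pvLoopA dag source fuel visited stack = false →
      ∀ n, (n ∈ stack ∨ n ∈ visited) → ¬ pvReach dag source n := by
  intro fuel
  induction fuel with
  | zero =>
    intro visited stack hfuel hinv _ n hn hr
    have hstack : stack = [] := by
      cases stack with
      | nil => rfl
      | cons a t => simp only [List.length_cons] at hfuel; omega
    subst hstack
    have hcl : ∀ v ∈ visited, v ≠ source ∧ ∀ n' ∈ pvLookup dag v, n' ∈ visited := by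
      intro v hv
      refine ⟨(hinv v hv).1, fun n' hn' => ?_⟩
      rcases (hinv v hv).2 n' hn' with h | h
      · exact h
      · simp at h
    rcases hn with hn | hn
    · simp at hn
    · exact pvClosed_not_reach dag source visited hcl n hr hn
  | succ fuel ih =>
    intro visited stack hfuel hinv hloop n hn hr
    match stack with
    | [] =>
      have hcl : ∀ v ∈ visited, v ≠ source ∧ ∀ n' ∈ pvLookup dag v, n' ∈ visited := by
        intro v hv
        refine ⟨(hinv v hv).1, fun n' hn' => ?_⟩
        rcases (hinv v hv).2 n' hn' with h | h
        · exact h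
        · simp at h
      rcases hn with hn | hn
      · simp at hn
      · exact pvClosed_not_reach dag source visited hcl n hr hn
    | node :: rest =>
      simp only [pvLoopA] at hloop
      split_ifs at hloop with h1 h2
      · -- node ∈ visited
        have hinv' : ∀ v ∈ visited, v ≠ source ∧ ∀ n' ∈ pvLookup dag v, n' ∈ visited ∨ n' ∈ rest := by
          intro v hv
          refine ⟨(hinv v hv).1, fun n' hn' => ?_⟩
          rcases (hinv v hv).2 n' hn' with h | h
          · exact Or.inl h
          · rcases List.mem_cons.mp h with h | h
            · exact Or.inl (h ▸ h2)
            · exact Or.inr h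
        have hfuel' : rest.length + pvRem dag visited ≤ fuel := by
          simp only [List.length_cons] at hfuel; omega
        refine ih visited rest hfuel' hinv' hloop n ?_ hr
        rcases hn with hn | hn
        · rcases List.mem_cons.mp hn with h | h
          · exact Or.inr (h ▸ h2)
          · exact Or.inl h
        · exact Or.inr hn
      · -- new node: visit it and push its neighbors
        set stack' := (pvLookup dag node).reverse ++ rest with hstack'
        have hfuel' : stack'.length + pvRem dag (node :: visited) ≤ fuel := by
          have := pvRem_cons_le dag visited node h2
          simp only [hstack', List.length_append, List.length_reverse, List.length_cons] at *
          omega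
        have hinv' : ∀ v ∈ node :: visited, v ≠ source ∧
            ∀ n' ∈ pvLookup dag v, n' ∈ node :: visited ∨ n' ∈ stack' := by
          intro v hv
          rcases List.mem_cons.mp hv with hv | hv
          · subst hv
            exact ⟨h1, fun n' hn' => Or.inr (List.mem_append.mpr (Or.inl (List.mem_reverse.mpr hn')))⟩
          · refine ⟨(hinv v hv).1, fun n' hn' => ?_⟩
            rcases (hinv v hv).2 n' hn' with h | h
            · exact Or.inl (List.mem_cons_of_mem _ h)
            · rcases List.mem_cons.mp h with h | h
              · exact Or.inl (h ▸ List.mem_cons_self ..)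
              · exact Or.inr (List.mem_append.mpr (Or.inr h))
        refine ih (node :: visited) stack' hfuel' hinv' hloop n ?_ hr
        rcases hn with hn | hn
        · rcases List.mem_cons.mp hn with h | h
          · exact Or.inr (h ▸ List.mem_cons_self ..)
          · exact Or.inl (List.mem_append.mpr (Or.inr h))
        · exact Or.inr (List.mem_cons_of_mem _ hn)

theorem creates_cycle_py_iff (dag : List (String × List String)) (source target : String) :
    creates_cycle_py dag source target = true ↔ pvReach dag source target := by
  constructor
  · intro h
    obtain ⟨n, hn, hr⟩ := pvLoopA_sound dag source _ _ _ h
    simp at hn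
    exact hn ▸ hr
  · intro hr
    by_contra h
    have hfalse : pvLoopA dag source (1 + pvRem dag []) [] [target] = false := by
      cases hval : creates_cycle_py dag source target
      · exact hval
      · exact absurd hval h
    exact pvLoopA_complete dag source _ [] [target] (by simp)
      (by simp) hfalse target (Or.inl (List.mem_cons_self ..)) hr

-- ----- port B = reachability -----

theorem pvScanNbrs_none (source : String) (reached : PySem.Set String) :
    ∀ (l : List String) (nxt : PySem.Set String),
      pvScanNbrs source reached l nxt = none → source ∈ l := by
  intro l
  induction l with
  | nil => intro nxt h; simp [pvScanNbrs] at h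
  | cons nb t ih =>
    intro nxt h
    simp only [pvScanNbrs] at h
    split_ifs at h with h1 h2
    · exact h1 ▸ List.mem_cons_self ..
    · exact List.mem_cons_of_mem _ (ih _ h)
    · exact List.mem_cons_of_mem _ (ih _ h)

theorem pvScanNbrs_some_mono (source : String) (reached : PySem.Set String) :
    ∀ (l : List String) (nxt nxt' : PySem.Set String),
      pvScanNbrs source reached l nxt = some nxt' → ∀ x ∈ nxt, x ∈ nxt' := by
  intro l
  induction l with
  | nil => intro nxt nxt' h; simp [pvScanNbrs] at h; exact h ▸ fun x hx => hx
  | cons nb t ih =>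
    intro nxt nxt' h
    simp only [pvScanNbrs] at h
    split_ifs at h with h1 h2
    · exact ih _ _ h
    · intro x hx
      exact ih _ _ h x ((PySem.Set.mem_add _ _ _).mpr (Or.inl hx))

theorem pvScanNbrs_some_mem (source : String) (reached : PySem.Set String) :
    ∀ (l : List String) (nxt nxt' : PySem.Set String),
      pvScanNbrs source reached l nxt = some nxt' →
      ∀ x ∈ nxt', x ∈ nxt ∨ (x ∈ l ∧ x ≠ source ∧ x ∉ reached) := by
  intro l
  induction l with
  | nil => intro nxt nxt' h; simp [pvScanNbrs] at h; exact h ▸ fun x hx => Or.inl hx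
  | cons nb t ih =>
    intro nxt nxt' h
    simp only [pvScanNbrs] at h
    split_ifs at h with h1 h2
    · intro x hx
      rcases ih _ _ h x hx with hx' | ⟨hm, hs, hrr⟩
      · exact Or.inl hx'
      · exact Or.inr ⟨List.mem_cons_of_mem _ hm, hs, hrr⟩
    · intro x hx
      rcases ih _ _ h x hx with hx' | ⟨hm, hs, hrr⟩
      · rcases (PySem.Set.mem_add _ _ _).mp hx' with hx'' | hx''
        · exact Or.inl hx''
        · exact Or.inr ⟨hx'' ▸ List.mem_cons_self .., hx'' ▸ h1, hx'' ▸ h2⟩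
      · exact Or.inr ⟨List.mem_cons_of_mem _ hm, hs, hrr⟩

theorem pvScanNbrs_some_cover (source : String) (reached : PySem.Set String) :
    ∀ (l : List String) (nxt nxt' : PySem.Set String),
      pvScanNbrs source reached l nxt = some nxt' →
      ∀ nb ∈ l, nb ≠ source ∧ (nb ∈ reached ∨ nb ∈ nxt') := by
  intro l
  induction l with
  | nil => intro nxt nxt' _ nb h; simp at h
  | cons nb0 t ih =>
    intro nxt nxt' h nb hnb
    simp only [pvScanNbrs] at h
    split_ifs at h with h1 h2
    · rcases List.mem_cons.mp hnb with hnb | hnb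
      · exact hnb ▸ ⟨h1, Or.inl (hnb ▸ h2)⟩
      · exact ih _ _ h nb hnb
    · rcases List.mem_cons.mp hnb with hnb | hnb
      · refine hnb ▸ ⟨h1, Or.inr ?_⟩
        exact pvScanNbrs_some_mono source reached t _ _ h nb0 ((PySem.Set.mem_add _ _ _).mpr (Or.inr rfl))
      · exact ih _ _ h nb hnb

theorem pvScanFrontier_none (dag : List (String × List String)) (source : String)
    (reached : PySem.Set String) :
    ∀ (F : List String) (nxt : PySem.Set String),
      pvScanFrontier dag source reached F nxt = none →
      ∃ f ∈ F, source ∈ pvLookup dag f := by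
  intro F
  induction F with
  | nil => intro nxt h; simp [pvScanFrontier] at h
  | cons node t ih =>
    intro nxt h
    simp only [pvScanFrontier] at h
    cases hs : pvScanNbrs source reached (pvLookup dag node) nxt with
    | none => exact ⟨node, List.mem_cons_self .., pvScanNbrs_none source reached _ _ hs⟩
    | some nxt' =>
      rw [hs] at h
      obtain ⟨f, hf, hsf⟩ := ih _ h
      exact ⟨f, List.mem_cons_of_mem _ hf, hsf⟩

theorem pvScanFrontier_some_mono (dag : List (String × List String)) (source : String)
    (reached : PySem.Set String) :
    ∀ (F : List String) (nxt nxt' : PySem.Set String),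
      pvScanFrontier dag source reached F nxt = some nxt' → ∀ x ∈ nxt, x ∈ nxt' := by
  intro F
  induction F with
  | nil => intro nxt nxt' h; simp [pvScanFrontier] at h; exact h ▸ fun x hx => hx
  | cons node t ih =>
    intro nxt nxt' h
    simp only [pvScanFrontier] at h
    cases hs : pvScanNbrs source reached (pvLookup dag node) nxt with
    | none => rw [hs] at h; simp at h
    | some nxtm =>
      rw [hs] at h
      intro x hx
      exact ih _ _ h x (pvScanNbrs_some_mono source reached _ _ _ hs x hx)

theorem pvScanFrontier_some_mem (dag : List (String × List String)) (source : String)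
    (reached : PySem.Set String) :
    ∀ (F : List String) (nxt nxt' : PySem.Set String),
      pvScanFrontier dag source reached F nxt = some nxt' →
      ∀ x ∈ nxt', x ∈ nxt ∨ (∃ f ∈ F, x ∈ pvLookup dag f) ∧ x ≠ source ∧ x ∉ reached := by
  intro F
  induction F with
  | nil => intro nxt nxt' h; simp [pvScanFrontier] at h; exact h ▸ fun x hx => Or.inl hx
  | cons node t ih =>
    intro nxt nxt' h
    simp only [pvScanFrontier] at h
    cases hs : pvScanNbrs source reached (pvLookup dag node) nxt with
    | none => rw [hs] at h; simp at h
    | some nxtm =>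
      rw [hs] at h
      intro x hx
      rcases ih _ _ h x hx with hx' | ⟨⟨f, hf, hlf⟩, hxs, hxr⟩
      · rcases pvScanNbrs_some_mem source reached _ _ _ hs x hx' with hx'' | ⟨hm, hs', hr'⟩
        · exact Or.inl hx''
        · exact Or.inr ⟨⟨node, List.mem_cons_self .., hm⟩, hs', hr'⟩
      · exact Or.inr ⟨⟨f, List.mem_cons_of_mem _ hf, hlf⟩, hxs, hxr⟩

theorem pvScanFrontier_some_cover (dag : List (String × List String)) (source : String)
    (reached : PySem.Set String) :
    ∀ (F : List String) (nxt nxt' : PySem.Set String),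
      pvScanFrontier dag source reached F nxt = some nxt' →
      ∀ f ∈ F, ∀ nb ∈ pvLookup dag f, nb ≠ source ∧ (nb ∈ reached ∨ nb ∈ nxt') := by
  intro F
  induction F with
  | nil => intro nxt nxt' _ f h; simp at h
  | cons node t ih =>
    intro nxt nxt' h f hf nb hnb
    simp only [pvScanFrontier] at h
    cases hs : pvScanNbrs source reached (pvLookup dag node) nxt with
    | none => rw [hs] at h; simp at h
    | some nxtm =>
      rw [hs] at h
      rcases List.mem_cons.mp hf with hf' | hf'
      · subst hf'
        obtain ⟨h1, h2⟩ := pvScanNbrs_some_cover source reached _ _ _ hs nb hnb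
        rcases h2 with h2 | h2
        · exact ⟨h1, Or.inl h2⟩
        · exact ⟨h1, Or.inr (pvScanFrontier_some_mono dag source reached t _ _ h nb h2)⟩
      · exact ih _ _ h f hf' nb hnb

theorem pvLoopB_sound (dag : List (String × List String)) (source : String) :
    ∀ (fuel : Nat) (reached frontier : PySem.Set String),
      pvLoopB dag source fuel reached frontier = true →
      ∃ n ∈ frontier, pvReach dag source n := by
  intro fuel
  induction fuel with
  | zero => intro reached frontier h; simp [pvLoopB] at h
  | succ fuel ih =>
    intro reached frontier h
    match frontier with
    | [] => simp [pvLoopB] at h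
    | a :: t =>
      simp only [pvLoopB] at h
      cases hs : pvScanFrontier dag source reached (a :: t) PySem.Set.empty with
      | none =>
        obtain ⟨f, hf, hsf⟩ := pvScanFrontier_none dag source reached _ _ hs
        exact ⟨f, hf, pvReach.step f source hsf pvReach.refl⟩
      | some nxt =>
        rw [hs] at h
        obtain ⟨n, hn, hr⟩ := ih _ _ h
        rcases pvScanFrontier_some_mem dag source reached _ _ _ hs n hn with hn' | ⟨⟨f, hf, hlf⟩, _, _⟩
        · simp [PySem.Set.empty] at hn'
        · exact ⟨f, hf, pvReach.step f n hlf hr⟩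

-- the elements of every adjacency list, with multiplicity: the universe the frontier draws from
theorem pvLookup_sub (dag : List (String × List String)) (node : String) :
    ∀ x ∈ pvLookup dag node, x ∈ dag.flatMap (fun p => p.2) := by
  induction dag with
  | nil => simp [pvLookup_nil]
  | cons p tl ih =>
    obtain ⟨k, vs⟩ := p
    intro x hx
    rw [pvLookup_cons] at hx
    by_cases hk : k = node
    · rw [if_pos hk] at hx
      simp [List.mem_flatMap]
      exact Or.inl hx
    · rw [if_neg hk] at hx
      simp only [List.flatMap_cons, List.mem_append]
      exact Or.inr (ih x hx)

def pvMiss (dag : List (String × List String)) (R : List String) : Nat :=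
  ((dag.flatMap (fun p => p.2)).filter (fun x => decide (x ∉ R))).length

theorem pvFilter_le {α : Type} (p q : α → Bool) (l : List α)
    (hpq : ∀ x, q x = true → p x = true) :
    (l.filter q).length ≤ (l.filter p).length := by
  induction l with
  | nil => simp
  | cons a t ih =>
    simp only [List.filter_cons]
    cases hqa : q a
    · cases hpa : p a
      · simpa using ih
      · simp; omega
    · rw [hpq a hqa]
      simpa using ih

theorem pvFilter_lt {α : Type} (p q : α → Bool) (l : List α)
    (hpq : ∀ x, q x = true → p x = true) (x₀ : α) (hx₀ : x₀ ∈ l)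
    (hp : p x₀ = true) (hq : q x₀ = false) :
    (l.filter q).length < (l.filter p).length := by
  induction l with
  | nil => simp at hx₀
  | cons a t ih =>
    have hle : (t.filter q).length ≤ (t.filter p).length := pvFilter_le p q t hpq
    rcases List.mem_cons.mp hx₀ with h | h
    · subst h
      simp only [List.filter_cons, hp, hq]
      simp
      omega
    · have := ih h
      simp only [List.filter_cons]
      cases hqa : q a
      · cases hpa : p a
        · simpa using this
        · simp; omega
      · rw [hpq a hqa]
        simp
        omega

theorem pvMiss_lt (dag : List (String × List String)) (R R' : List String)
    (hsub : ∀ x ∈ R, x ∈ R') (x₀ : String) (hx₀ : x₀ ∈ dag.flatMap (fun p => p.2))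
    (hx₀R : x₀ ∉ R) (hx₀R' : x₀ ∈ R') : pvMiss dag R' < pvMiss dag R := by
  refine pvFilter_lt _ _ _ ?_ x₀ hx₀ ?_ ?_
  · intro x hx
    simp only [decide_eq_true_eq] at hx ⊢
    intro hmem
    exact hx (hsub x hmem)
  · simp [hx₀R]
  · simp [hx₀R']

theorem pvLoopB_complete (dag : List (String × List String)) (source : String) :
    ∀ (fuel : Nat) (reached frontier : PySem.Set String),
      pvMiss dag reached + 2 ≤ fuel →
      (∀ x ∈ frontier, x ∈ reached) →
      source ∉ reached →
      (∀ v ∈ reached, v ∉ frontier → ∀ n' ∈ pvLookup dag v, n' ≠ source ∧ n' ∈ reached) →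
      pvLoopB dag source fuel reached frontier = false →
      ∀ n ∈ reached, ¬ pvReach dag source n := by
  intro fuel
  induction fuel with
  | zero => intro reached frontier hfuel; omega
  | succ fuel ih =>
    intro reached frontier hfuel hFR hsrc hinv hloop n hn hr
    match frontier with
    | [] =>
      refine pvClosed_not_reach dag source reached ?_ n hr hn
      intro v hv
      refine ⟨fun h => hsrc (h ▸ hv), fun n' hn' => ((hinv v hv (by simp)) n' hn').2⟩
    | a :: t =>
      simp only [pvLoopB] at hloop
      cases hs : pvScanFrontier dag source reached (a :: t) PySem.Set.empty with
      | none => rw [hs] at hloop; simp at hloop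
      | some nxt =>
        rw [hs] at hloop
        have cover := pvScanFrontier_some_cover dag source reached _ _ _ hs
        have memf := pvScanFrontier_some_mem dag source reached _ _ _ hs
        cases nxt with
        | nil =>
          -- frontier fully expanded, nothing new: reached is closed
          refine pvClosed_not_reach dag source reached ?_ n hr hn
          intro v hv
          refine ⟨fun h => hsrc (h ▸ hv), fun n' hn' => ?_⟩
          by_cases hvF : v ∈ a :: t
          · rcases (cover v hvF n' hn').2 with h | h
            · exact h
            · simp at h
          · exact ((hinv v hv hvF) n' hn').2
        | cons x₀ nxtt =>
          have hmemx : ∀ x ∈ x₀ :: nxtt, (∃ f ∈ a :: t, x ∈ pvLookup dag f) ∧ x ≠ source ∧ x ∉ reached := by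
            intro x hx
            rcases memf x hx with h | h
            · simp [PySem.Set.empty] at h
            · exact h
          set R' := PySem.Set.union reached (x₀ :: nxtt) with hR'
          have hmemR' : ∀ x, x ∈ R' ↔ x ∈ reached ∨ x ∈ x₀ :: nxtt := by
            intro x; exact PySem.Set.mem_union reached (x₀ :: nxtt) x
          have hsubR' : ∀ x ∈ reached, x ∈ R' := fun x hx => (hmemR' x).mpr (Or.inl hx)
          have hfuel' : pvMiss dag R' + 2 ≤ fuel := by
            have hx₀ := hmemx x₀ (List.mem_cons_self ..)
            obtain ⟨⟨f, hf, hlf⟩, _, hx₀R⟩ := hx₀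
            have : pvMiss dag R' < pvMiss dag reached :=
              pvMiss_lt dag reached R' hsubR' x₀ (pvLookup_sub dag f x₀ hlf) hx₀R
                ((hmemR' x₀).mpr (Or.inr (List.mem_cons_self ..)))
            omega
          have hFR' : ∀ x ∈ x₀ :: nxtt, x ∈ R' := fun x hx => (hmemR' x).mpr (Or.inr hx)
          have hsrc' : source ∉ R' := by
            intro h
            rcases (hmemR' source).mp h with h | h
            · exact hsrc h
            · exact (hmemx source h).2.1 rfl
          have hinv' : ∀ v ∈ R', v ∉ x₀ :: nxtt → ∀ n' ∈ pvLookup dag v, n' ≠ source ∧ n' ∈ R' := by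
            intro v hv hvF n' hn'
            have hvR : v ∈ reached := by
              rcases (hmemR' v).mp hv with h | h
              · exact h
              · exact absurd h hvF
            by_cases hvOld : v ∈ a :: t
            · obtain ⟨h1, h2⟩ := cover v hvOld n' hn'
              rcases h2 with h | h
              · exact ⟨h1, hsubR' _ h⟩
              · exact ⟨h1, (hmemR' n').mpr (Or.inr h)⟩
            · obtain ⟨h1, h2⟩ := hinv v hvR hvOld n' hn'
              exact ⟨h1, hsubR' _ h2⟩
          exact ih R' (x₀ :: nxtt) hfuel' hFR' hsrc' hinv' hloop n (hsubR' n hn) hr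

theorem creates_cycle_py_alt_iff (dag : List (String × List String)) (source target : String) :
    creates_cycle_py_alt dag source target = true ↔ pvReach dag source target := by
  unfold creates_cycle_py_alt
  by_cases hts : target = source
  · rw [if_pos hts, hts]
    exact ⟨fun _ => pvReach.refl, fun _ => rfl⟩
  · rw [if_neg hts]
    constructor
    · intro h
      obtain ⟨n, hn, hr⟩ := pvLoopB_sound dag source _ _ _ h
      rw [PySem.Set.mem_ofList] at hn
      simp at hn
      exact hn ▸ hr
    · intro hr
      by_contra h
      have hfalse : pvLoopB dag source (2 + (dag.flatMap (fun p => p.2)).length)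
          (PySem.Set.ofList [target]) (PySem.Set.ofList [target]) = false := by
        cases hval : pvLoopB dag source (2 + (dag.flatMap (fun p => p.2)).length)
            (PySem.Set.ofList [target]) (PySem.Set.ofList [target])
        · rfl
        · exact absurd hval h
      have hone : PySem.Set.ofList [target] = [target] :=
        PySem.Set.ofList_eq_self_of_nodup [target] (List.nodup_singleton target)
      rw [hone] at hfalse
      have hmiss : pvMiss dag [target] + 2 ≤ 2 + (dag.flatMap (fun p => p.2)).length := by
        have h := List.length_filter_le (fun x => decide (x ∉ [target])) (dag.flatMap (fun p => p.2))
        unfold pvMiss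
        omega
      refine pvLoopB_complete dag source _ [target] [target] hmiss (fun x hx => hx)
        ?_ ?_ hfalse target (List.mem_cons_self ..) hr
      · intro h'
        simp at h'
        exact hts h'.symm
      · intro v hv hvF
        exact absurd hv hvF

-- ===== VERDICT (by name: the statement is the Claim_ definition above) =====
theorem creates_cycle_py_spec : Claim_equal_creates_cycle_py := by
  unfold Claim_equal_creates_cycle_py
  intro dag source target _ _
  unfold Spec_creates_cycle_py
  have hA := creates_cycle_py_iff dag source target
  have hB := creates_cycle_py_alt_iff dag source target
  cases hvA : creates_cycle_py dag source target <;>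
    cases hvB : creates_cycle_py_alt dag source target <;> simp_all
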